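-- pv_equiv track=rewrite | github.com/NIM-NMDC/MSIMG | cartography/training_dynamics_filtering.py | compute_forgetfulness
-- ===== SOURCE A (Python) =====
-- def compute_forgetfulness(correctness_trend):
--     """
--     Given a epoch-wise trend of train predictions, compute frequency with which
--     an example is forgotten, i.e. predicted incorrectly _after_ being predicted correctly.
--     Based on: https://arxiv.org/abs/1812.05159
--     """
--     # Example is never predicted correctly, or learnt!
--     if not any(correctness_trend):
--         return 1000
--     learnt = False  # Predicted correctly in the current epoch
--     times_forgotten = 0
--     for is_correct in correctness_trend:
--         if (not learnt and not is_correct) or (learnt and is_correct):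
--             # Nothing changed.
--             continue
--         elif learnt and not is_correct:
--             # Forgot after learning at some point!
--             learnt = False
--             times_forgotten += 1
--         elif not learnt and is_correct:
--             # Learnt!
--             learnt = True
--     return times_forgotten
-- ===== SOURCE B (Python) =====
-- def compute_forgetfulness(correctness_trend):
--     # Stage 1: run-length compress the trend into the sequence of run values.
--     runs = []
--     for is_correct in correctness_trend:
--         b = bool(is_correct)
--         if not runs or runs[-1] != b:
--             runs.append(b)
--     # Never learnt at all.
--     if True not in runs:
--         return 1000
--     # Every learnt (True) run ends in a forgetting event, except a trailing one.
--     return runs.count(True) - (1 if runs[-1] else 0)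
-- ===== Notes on version B (the rewrite author's own statement) =====
-- stated objective: alternative
-- what changed: Replaces the learnt-flag state machine with a two-stage run-length compression: build the list of run values, then count True runs and subtract one for a trailing True run.
import Mathlib
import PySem

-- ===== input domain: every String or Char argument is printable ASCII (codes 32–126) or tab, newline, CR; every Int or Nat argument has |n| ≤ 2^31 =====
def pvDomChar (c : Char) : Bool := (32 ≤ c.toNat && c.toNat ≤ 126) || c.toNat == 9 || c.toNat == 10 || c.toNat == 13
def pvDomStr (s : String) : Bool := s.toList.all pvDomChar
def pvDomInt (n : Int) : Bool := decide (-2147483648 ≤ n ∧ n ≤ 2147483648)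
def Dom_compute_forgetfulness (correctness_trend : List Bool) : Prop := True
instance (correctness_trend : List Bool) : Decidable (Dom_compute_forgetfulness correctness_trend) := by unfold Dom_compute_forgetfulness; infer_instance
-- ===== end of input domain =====

-- B replaces A's 'learnt'-flag state machine with a two-stage run-length compression:
-- build the list of run values, then count True runs minus a trailing True run (alternative decomposition, same O(n) cost).

-- ===== PORT A =====
-- state machine: fold over the trend carrying (learnt, times_forgotten)
def compute_forgetfulness (correctness_trend : List Bool) : Int :=
  if !(correctness_trend.any id) then 1000
  else
    let s := correctness_trend.foldl
      (fun (st : Bool × Int) is_correct =>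
        let (learnt, times_forgotten) := st
        if (!learnt && !is_correct) || (learnt && is_correct) then
          (learnt, times_forgotten)
        else if learnt && !is_correct then
          (false, times_forgotten + 1)
        else if !learnt && is_correct then
          (true, times_forgotten)
        else (learnt, times_forgotten))
      (false, 0)
    s.2

-- ===== PORT B =====
-- stage 1: run-length compress (append b when runs is empty or its last differs)
def pvRunStep (runs : List Bool) (b : Bool) : List Bool :=
  if runs.getLast? ≠ some b then runs ++ [b] else runs

-- stage 2: count True runs, subtracting one for a trailing True run
def compute_forgetfulness_alt (correctness_trend : List Bool) : Int :=
  let runs := correctness_trend.foldl pvRunStep []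
  if ¬ runs.contains true then 1000
  else (runs.count true : Int) - (if runs.getLastD false then 1 else 0)

-- ===== PRECONDITION & SPEC =====
def Spec_compute_forgetfulness (correctness_trend : List Bool) (out : Int) : Prop := out = compute_forgetfulness_alt correctness_trend
instance (correctness_trend : List Bool) (out : Int) : Decidable (Spec_compute_forgetfulness correctness_trend out) := by unfold Spec_compute_forgetfulness; infer_instance

-- ===== CLAIM (what is proved, stated in full; the proofs are below) =====
def Claim_equal_compute_forgetfulness : Prop := ∀ (correctness_trend : List Bool), Dom_compute_forgetfulness correctness_trend → Spec_compute_forgetfulness correctness_trend (compute_forgetfulness correctness_trend)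

-- ===== LEMMAS AND PROOFS =====

-- A's fold step, named for the lemmas
def pvStepA (st : Bool × Int) (is_correct : Bool) : Bool × Int :=
  let (learnt, times_forgotten) := st
  if (!learnt && !is_correct) || (learnt && is_correct) then
    (learnt, times_forgotten)
  else if learnt && !is_correct then
    (false, times_forgotten + 1)
  else if !learnt && is_correct then
    (true, times_forgotten)
  else (learnt, times_forgotten)

theorem pvStepA_eq (st : Bool × Int) (c : Bool) :
    pvStepA st c = (c, st.2 + if st.1 && !c then 1 else 0) := by
  obtain ⟨l, t⟩ := st
  cases l <;> cases c <;> simp [pvStepA]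

-- falling edges (True→False) of l::xs
def pvFall (l : Bool) (xs : List Bool) : Int :=
  ((((l :: xs).zip xs).filter (fun pc => pc.1 && !pc.2)).length : Int)

-- rising edges (False→True) of l::xs
def pvRise (l : Bool) (xs : List Bool) : Int :=
  ((((l :: xs).zip xs).filter (fun pc => !pc.1 && pc.2)).length : Int)

theorem pvFoldA (xs : List Bool) (l : Bool) (t : Int) :
    xs.foldl pvStepA (l, t) = (xs.getLastD l, t + pvFall l xs) := by
  induction xs generalizing l t with
  | nil => simp [pvFall]
  | cons x xs ih =>
      simp only [List.foldl_cons, pvStepA_eq, ih, Prod.mk.injEq, pvFall]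
      constructor
      · cases xs <;> simp [List.getLastD]
      · simp only [List.zip_cons_cons, List.filter_cons]
        by_cases h : (l && !x) = true <;> simp [h, pvFall] <;> ring

-- edge balance: rising minus falling edges equals final state minus initial state
theorem pvEdgeBalance (xs : List Bool) (l : Bool) :
    pvRise l xs - pvFall l xs =
      (if xs.getLastD l then (1 : Int) else 0) - (if l then 1 else 0) := by
  induction xs generalizing l with
  | nil => simp [pvRise, pvFall]
  | cons x xs ih =>
      have h := ih x
      simp only [pvRise, pvFall, List.zip_cons_cons, List.filter_cons] at h ⊢
      have hl : (x :: xs).getLastD l = xs.getLastD x := by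
        cases xs <;> simp [List.getLastD]
      rw [hl]
      cases l <;> cases x <;> simp at h ⊢ <;> omega

-- invariant of the run-compression fold, started from a nonempty state r with last l
theorem pvRunsInv (xs : List Bool) (r : List Bool) (l : Bool) (h : r.getLast? = some l) :
    (xs.foldl pvRunStep r).getLast? = some (xs.getLastD l) ∧
    ((xs.foldl pvRunStep r).count true : Int) = (r.count true : Int) + pvRise l xs ∧
    (∀ b, b ∈ xs.foldl pvRunStep r ↔ b ∈ r ∨ b ∈ xs) := by
  induction xs generalizing r l with
  | nil => simp [pvRise, h]
  | cons x xs ih =>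
      simp only [List.foldl_cons]
      by_cases hx : x = l
      · subst hx
        have hstep : pvRunStep r x = r := by simp [pvRunStep, h]
        rw [hstep]
        obtain ⟨h1, h2, h3⟩ := ih r x h
        refine ⟨by rw [List.getLastD_cons]; exact h1, ?_, ?_⟩
        · rw [h2]
          simp only [pvRise, List.zip_cons_cons, List.filter_cons]
          cases x <;> simp
        · intro b
          rw [h3 b]
          have : x ∈ r := List.mem_of_getLast? h
          constructor
          · rintro (hb | hb) <;> simp_all
          · rintro (hb | hb)
            · exact Or.inl hb
            · rcases List.mem_cons.mp hb with hb | hb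
              · subst hb; exact Or.inl this
              · exact Or.inr hb
      · have hstep : pvRunStep r x = r ++ [x] := by
          simp [pvRunStep, h, Ne.symm hx]
        rw [hstep]
        have hlast : (r ++ [x]).getLast? = some x := by simp
        obtain ⟨h1, h2, h3⟩ := ih (r ++ [x]) x hlast
        refine ⟨by rw [List.getLastD_cons]; exact h1, ?_, ?_⟩
        · rw [h2]
          simp only [pvRise, List.zip_cons_cons, List.filter_cons, List.count_append]
          cases l <;> cases x <;> simp_all [pvRise] <;> push_cast <;> ring
        · intro b
          rw [h3 b]
          simp only [List.mem_append, List.mem_singleton, List.mem_cons]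
          tauto

-- ===== VERDICT (by name: the statement is the Claim_ definition above) =====
theorem compute_forgetfulness_spec : Claim_equal_compute_forgetfulness := by
  intro xs _
  unfold Spec_compute_forgetfulness compute_forgetfulness compute_forgetfulness_alt
  cases xs with
  | nil => simp [pvRunStep]
  | cons x xs =>
      have hstep0 : pvRunStep [] x = [x] := by simp [pvRunStep]
      simp only [List.foldl_cons, hstep0]
      obtain ⟨h1, h2, h3⟩ := pvRunsInv xs [x] x (by simp)
      by_cases hAny : ((x :: xs).any id) = true
      · have hmem : true ∈ xs.foldl pvRunStep [x] := by
          rw [h3]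
          have := List.any_eq_true.mp hAny
          obtain ⟨b, hb, hbid⟩ := this
          simp only [id] at hbid; subst hbid
          rcases List.mem_cons.mp hb with hb | hb
          · exact Or.inl (by simp [hb])
          · exact Or.inr hb
        have hc : (xs.foldl pvRunStep [x]).contains true = true := by
          simpa [List.contains_iff_mem] using hmem
        simp only [hAny, Bool.not_true, Bool.false_eq_true, if_false, hc,
          Bool.true_eq_false, not_false_eq_true, if_neg, not_true]
        show (List.foldl pvStepA (false, 0) (x :: xs)).2 = _
        rw [show (x :: xs).foldl pvStepA (false, 0) = xs.foldl pvStepA (x, (0 : Int) + if false && !x then 1 else 0) by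
          simp only [List.foldl_cons, pvStepA_eq]]
        rw [pvFoldA]
        have hld : (xs.foldl pvRunStep [x]).getLastD false = xs.getLastD x := by
          rw [List.getLastD_eq_getLast?, h1]; rfl
        rw [h2, hld]
        have hb := pvEdgeBalance xs x
        have hcx : ((List.count true [x] : Nat) : Int) = if x then 1 else 0 := by
          cases x <;> simp
        rw [hcx]
        by_cases hg : xs.getLastD x = true <;> by_cases hx : x = true <;>
          simp only [hg, hx, if_true, if_false, Bool.false_eq_true, Bool.false_and,
            Bool.not_false, Bool.and_self] at hb ⊢ <;>
          simp_all <;> omega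
      · have hnm : ¬ true ∈ xs.foldl pvRunStep [x] := by
          rw [h3]
          intro hmem
          apply hAny
          rcases hmem with hm | hm
          · simp at hm; subst hm; simp
          · exact List.any_eq_true.mpr ⟨true, by simp [hm], rfl⟩
        have hc : (xs.foldl pvRunStep [x]).contains true = false := by
          simpa [List.contains_iff_mem] using hnm
        simp only [Bool.not_eq_true] at hAny
        simp [hAny, hc]
        all_goals exact fun hm => absurd hm hnm
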